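-- pv_equiv track=rewrite | github.com/JakubBlaha/Marvin | src/command_modules/cz.py | fix_content
-- ===== SOURCE A (Python) =====
-- CHARS: dict = {
--     '2': 'ě',
--     '3': 'š',
--     '4': 'č',
--     '5': 'ř',
--     '6': 'ž',
--     '7': 'ý',
--     '8': 'á',
--     '9': 'í',
--     '0': 'é',
--     ';': 'ů',
--     'y': 'z',
--     'z': 'y',
--     '>': ':'
-- }
--
-- NO_TRIGGER: set = {'y', 'z'}
--
-- def fix_content(s: str) -> str:
--     ignored_indexes = []
--     ignoring = False
--     for index, ch in enumerate(s):
--         if ch == '<' and not ignoring: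
--             ignoring = True
--         if ignoring:
--             ignored_indexes.append(index)
--         if ch == '>' and ignoring:
--             ignoring = False
--
--     # Check if required
--     for ch in s:
--         if ch in set(CHARS) - NO_TRIGGER:
--             break
--     else:
--         return s
--
--     for index, ch in enumerate(s):
--         if index not in ignored_indexes:
--             s = s[:index] + CHARS.get(s[index], s[index]) + s[index + 1:]
--
--     return s
-- ===== SOURCE B (Python) =====
-- CHARS: dict = {
--     '2': 'ě', '3': 'š', '4': 'č', '5': 'ř', '6': 'ž', '7': 'ý',
--     '8': 'á', '9': 'í', '0': 'é', ';': 'ů', 'y': 'z', 'z': 'y', '>': ':'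
-- }
--
-- NO_TRIGGER: set = {'y', 'z'}
--
-- def fix_content(s: str) -> str:
--     triggers = set(CHARS) - NO_TRIGGER
--     if not any(ch in triggers for ch in s):
--         return s
--     out = []
--     ignoring = False
--     for ch in s:
--         if ch == '<':
--             ignoring = True
--         out.append(ch if ignoring else CHARS.get(ch, ch))
--         if ch == '>' and ignoring:
--             ignoring = False
--     return ''.join(out)
-- ===== Notes on version B (the rewrite author's own statement) =====
-- stated objective: faster
-- what changed: B replaces A's three passes (collect an ignored-index table, then a trigger scan, then a per-index string-splicing pass with a linear membership scan of the index table) by the trigger scan plus one fused pass that carries the bracket-state flag and emits each output character directly.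
import Mathlib
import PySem

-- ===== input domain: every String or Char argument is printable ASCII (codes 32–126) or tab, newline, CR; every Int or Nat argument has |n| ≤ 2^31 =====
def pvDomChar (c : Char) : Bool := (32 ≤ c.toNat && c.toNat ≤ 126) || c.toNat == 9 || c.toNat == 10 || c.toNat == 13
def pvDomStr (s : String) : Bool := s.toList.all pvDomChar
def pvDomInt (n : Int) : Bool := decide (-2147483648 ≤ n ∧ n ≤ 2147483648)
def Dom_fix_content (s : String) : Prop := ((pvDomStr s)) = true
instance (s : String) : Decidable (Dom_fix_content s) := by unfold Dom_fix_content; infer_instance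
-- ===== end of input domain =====

-- B fuses the bracket-tracking and the remap into one pass with a boolean flag,
-- dropping A's ignored-index table, its per-index membership scan and its per-index string splicing (measured faster, O(n) vs O(n^2)).

-- ===== PORT A =====
-- module constant CHARS
def pyCHARS : PySem.Dict Char Char := PySem.Dict.ofList
  [('2','ě'),('3','š'),('4','č'),('5','ř'),('6','ž'),('7','ý'),('8','á'),
   ('9','í'),('0','é'),(';','ů'),('y','z'),('z','y'),('>',':')]

-- module constant NO_TRIGGER
def pyNO_TRIGGER : PySem.Set Char := PySem.Set.ofList ['y','z']

-- body of A's first loop (collect ignored_indexes, state = (ignored_indexes, ignoring))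
def fixA_step1 (st : List Int × Bool) (p : Int × Char) : List Int × Bool :=
  let ign1 := if p.2 == '<' && !st.2 then true else st.2
  let lst := if ign1 then st.1 ++ [p.1] else st.1
  let ign2 := if p.2 == '>' && ign1 then false else ign1
  (lst, ign2)

-- body of A's third loop: s = s[:index] + CHARS.get(s[index], s[index]) + s[index+1:]
def fixA_step2 (ign : List Int) (acc : List Char) (p : Int × Char) : List Char :=
  if ¬ (p.1 ∈ ign) then
    PySem.List.slice acc none (some p.1)
      ++ [pyCHARS.getD (PySem.List.pyGetD acc p.1 ' ') (PySem.List.pyGetD acc p.1 ' ')]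
      ++ PySem.List.slice acc (some (p.1 + 1)) none
  else acc

def fix_content (s : String) : String :=
  let ignored := ((PySem.List.enumerate s.toList 0).foldl fixA_step1 ([], false)).1
  -- A's second loop is a for/break/…else: 'return s unless some ch is in set(CHARS) - NO_TRIGGER'
  if s.toList.any (fun ch =>
      PySem.Set.contains (PySem.Set.diff (PySem.Set.ofList (PySem.Dict.keys pyCHARS)) pyNO_TRIGGER) ch) then
    String.ofList ((PySem.List.enumerate s.toList 0).foldl (fixA_step2 ignored) s.toList)
  else s

-- ===== PORT B =====
-- B's single fused loop over the characters, carrying the bracket-state flag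
def fixB_go : Bool → List Char → List Char
  | _, [] => []
  | b, c :: cs =>
    let b1 := b || (c == '<')
    (if b1 then c else pyCHARS.getD c c) :: fixB_go (b1 && !(c == '>')) cs

def fix_content_alt (s : String) : String :=
  let triggers := PySem.Set.diff (PySem.Set.ofList (PySem.Dict.keys pyCHARS)) pyNO_TRIGGER
  if s.toList.any (fun ch => PySem.Set.contains triggers ch) then
    String.ofList (fixB_go false s.toList)
  else s

-- ===== PRECONDITION & SPEC =====
def Spec_fix_content (s : String) (out : String) : Prop := out = fix_content_alt s
instance (s : String) (out : String) : Decidable (Spec_fix_content s out) := by unfold Spec_fix_content; infer_instance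

-- ===== CLAIM (what is proved, stated in full; the proofs are below) =====
def Claim_equal_fix_content : Prop := ∀ (s : String), Dom_fix_content s → Spec_fix_content s (fix_content s)

-- ===== LEMMAS AND PROOFS =====

-- per-position 'ignored' flags of A's first loop, as a list of booleans
def pvFlags : Bool → List Char → List Bool
  | _, [] => []
  | b, c :: cs =>
    let b1 := b || (c == '<')
    b1 :: pvFlags (b1 && !(c == '>')) cs

-- indexes (starting at k) whose flag is true
def pvTrueIdx (k : Int) : List Bool → List Int
  | [] => []
  | f :: fs => (if f then [k] else []) ++ pvTrueIdx (k + 1) fs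

@[simp] theorem pvFlags_length (b : Bool) (cs : List Char) :
    (pvFlags b cs).length = cs.length := by
  induction cs generalizing b with
  | nil => rfl
  | cons c cs ih => simp [pvFlags, ih]

theorem pvTrueIdx_lb (fs : List Bool) (k i : Int) (h : i ∈ pvTrueIdx k fs) : k ≤ i := by
  induction fs generalizing k with
  | nil => simp [pvTrueIdx] at h
  | cons f fs ih =>
    simp only [pvTrueIdx, List.mem_append] at h
    rcases h with h | h
    · split at h
      · simp_all
      · simp_all
    · have := ih (k + 1) h; omega

theorem pvTrueIdx_mem (fs : List Bool) (k : Int) (j : Nat) (hj : j < fs.length) :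
    ((k + j) ∈ pvTrueIdx k fs) = (fs[j] = true) := by
  induction fs generalizing k j with
  | nil => simp at hj
  | cons f fs ih =>
    cases j with
    | zero =>
      simp only [pvTrueIdx, List.mem_append]
      have hnb : k ∉ pvTrueIdx (k + 1) fs := fun h => by
        have := pvTrueIdx_lb fs (k + 1) k h; omega
      cases f <;> simp [hnb]
    | succ j =>
      have hj' : j < fs.length := by simpa using hj
      have hk : k + ((j + 1 : Nat) : Int) = (k + 1) + (j : Int) := by push_cast; ring
      rw [hk]
      simp only [pvTrueIdx, List.mem_append]
      have hhd : ((k + 1) + (j : Int)) ∉ (if f then [k] else []) := by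
        split
        · simp; omega
        · simp
      simp only [List.getElem_cons_succ, ← ih (k + 1) j hj']
      cases f
      · simp
      · simp at hhd ⊢; tauto

-- A's per-step state update, in the flag form pvFlags uses
theorem fixA_step1_eq (st : List Int × Bool) (p : Int × Char) :
    fixA_step1 st p =
      (if st.2 || (p.2 == '<') then st.1 ++ [p.1] else st.1,
       (st.2 || (p.2 == '<')) && !(p.2 == '>')) := by
  obtain ⟨l, b⟩ := st
  cases b <;> cases hc : (p.2 == '<') <;> cases hg : (p.2 == '>') <;>
    simp [fixA_step1, hc, hg]

-- A's first loop computes exactly the true positions of pvFlags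
theorem pvPass1_eq (cs : List Char) (b : Bool) (acc : List Int) (k : Int) :
    ((PySem.List.enumerate cs k).foldl fixA_step1 (acc, b)).1 =
      acc ++ pvTrueIdx k (pvFlags b cs) := by
  induction cs generalizing b acc k with
  | nil => simp [PySem.List.enumerate_nil, pvFlags, pvTrueIdx]
  | cons c cs ih =>
    rw [PySem.List.enumerate_cons]
    simp only [List.foldl_cons, fixA_step1_eq]
    rw [ih]
    simp only [pvFlags, pvTrueIdx]
    cases b <;> cases hc : (c == '<') <;> simp

-- A's rebuild loop = B's fused pass, given the membership facts about ignored_indexes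
theorem pvRebuild (cs : List Char) (b : Bool) (pre : List Char) (ign : List Int)
    (hmem : ∀ (j : Nat), j < cs.length →
      (((pre.length : Int) + j) ∈ ign) = ((pvFlags b cs)[j]? = some true)) :
    (PySem.List.enumerate cs (pre.length : Int)).foldl (fixA_step2 ign) (pre ++ cs)
      = pre ++ fixB_go b cs := by
  induction cs generalizing b pre with
  | nil => simp [PySem.List.enumerate_nil, fixB_go]
  | cons c cs ih =>
    rw [PySem.List.enumerate_cons, List.foldl_cons]
    have h0 := hmem 0 (by simp)
    simp only [Nat.cast_zero, add_zero, pvFlags, List.getElem?_cons_zero,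
      Option.some.injEq] at h0
    -- the next character of B's output and the updated flag
    have hmem' : ∀ (x : Char) (j : Nat), j < cs.length →
        ((((pre ++ [x]).length : Int) + j) ∈ ign)
          = ((pvFlags ((b || (c == '<')) && !(c == '>')) cs)[j]? = some true) := by
      intro x j hj
      have h := hmem (j + 1) (by simpa using Nat.succ_lt_succ hj)
      have e1 : (((pre ++ [x]).length : Int) + j) = (pre.length : Int) + ((j + 1 : Nat) : Int) := by
        simp only [List.length_append, List.length_cons, List.length_nil]; push_cast; ring
      rw [e1, h]
      simp [pvFlags]
    by_cases hb : (b || (c == '<')) = true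
    · -- ignored position: A keeps the string, B keeps the char
      have hmemb : ((pre.length : Int) ∈ ign) := by rw [h0]; exact hb
      have hstep : fixA_step2 ign (pre ++ c :: cs) ((pre.length : Int), c) = pre ++ c :: cs := by
        simp [fixA_step2, hmemb]
      have hlen : (pre.length : Int) + 1 = ((pre ++ [c]).length : Int) := by
        simp
      rw [hstep, show pre ++ c :: cs = (pre ++ [c]) ++ cs by simp, hlen,
        ih ((b || (c == '<')) && !(c == '>')) (pre ++ [c]) (hmem' c)]
      simp [fixB_go, hb]
    · -- not ignored: A splices in the remapped char, B maps it
      have hmemb : ¬ ((pre.length : Int) ∈ ign) := by rw [h0]; simp [hb]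
      have hget : PySem.List.pyGetD (pre ++ c :: cs) ((pre.length : Nat) : Int) ' ' = c := by
        simp
      have htake : PySem.List.slice (pre ++ c :: cs) none (some ((pre.length : Nat) : Int)) = pre := by
        rw [PySem.List.slice_to]
        · simp
        · positivity
      have hdrop : PySem.List.slice (pre ++ c :: cs) (some (((pre.length : Nat) : Int) + 1)) none = cs := by
        rw [PySem.List.slice_from]
        · have h1 : (((pre.length : Nat) : Int) + 1).toNat = pre.length + 1 := by omega
          rw [h1, (List.drop_length_add_append 1 :
              List.drop (pre.length + 1) (pre ++ c :: cs) = List.drop 1 (c :: cs))]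
          rfl
        · positivity
      have hstep : fixA_step2 ign (pre ++ c :: cs) ((pre.length : Int), c)
          = (pre ++ [pyCHARS.getD c c]) ++ cs := by
        simp [fixA_step2, hmemb, htake, hdrop, hget]
      have hlen : (pre.length : Int) + 1 = ((pre ++ [pyCHARS.getD c c]).length : Int) := by
        simp
      rw [hstep, hlen,
        ih ((b || (c == '<')) && !(c == '>')) (pre ++ [pyCHARS.getD c c]) (hmem' _)]
      simp [fixB_go, hb]

-- ===== VERDICT (by name: the statement is the Claim_ definition above) =====
theorem fix_content_spec : Claim_equal_fix_content := by
  intro s _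
  show fix_content s = fix_content_alt s
  simp only [fix_content, fix_content_alt]
  by_cases hg : s.toList.any (fun ch =>
      PySem.Set.contains (PySem.Set.diff (PySem.Set.ofList (PySem.Dict.keys pyCHARS)) pyNO_TRIGGER) ch) = true
  · rw [if_pos hg, if_pos hg]
    congr 1
    have hign : ((PySem.List.enumerate s.toList 0).foldl fixA_step1 ([], false)).1
        = pvTrueIdx 0 (pvFlags false s.toList) := by
      simpa using pvPass1_eq s.toList false [] 0
    rw [hign]
    have hmem0 : ∀ (j : Nat), j < s.toList.length →
        (((List.length ([] : List Char) : Int) + j) ∈ pvTrueIdx 0 (pvFlags false s.toList))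
          = ((pvFlags false s.toList)[j]? = some true) := by
      intro j hj
      have hj' : j < (pvFlags false s.toList).length := by simpa using hj
      simp only [List.length_nil, Nat.cast_zero]
      rw [pvTrueIdx_mem _ 0 j hj']
      simp [List.getElem?_eq_getElem hj']
    simpa using pvRebuild s.toList false [] (pvTrueIdx 0 (pvFlags false s.toList)) hmem0
  · rw [if_neg hg, if_neg hg]
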